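-- pv_equiv track=rewrite | github.com/vuhung16au/ACU | ITEC624/MonoAlphabeticCipher/mono-alphabetic-decrypt.py | decrypt_text
-- ===== SOURCE A (Python) =====
-- def decrypt_text(ciphertext, decrypt_mapping):
--     """
--     Decrypt the given ciphertext using the decryption mapping.
--
--     Args:
--         ciphertext (str): The text to decrypt
--         decrypt_mapping (dict): Mapping from cipher letters to plaintext letters
--
--     Returns:
--         str: The decrypted plaintext
--     """
--     plaintext = []
--
--     for char in ciphertext:
--         if char.isalpha():
--             # Decrypt alphabetic characters
--             decrypted_char = decrypt_mapping.get(char, char)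
--             plaintext.append(decrypted_char)
--         else:
--             # Keep non-alphabetic characters as they are
--             plaintext.append(char)
--
--     return ''.join(plaintext)
-- ===== SOURCE B (Python) =====
-- def decrypt_text(ciphertext, decrypt_mapping):
--     # Build a translation table once (only single-character alphabetic keys can
--     # ever match A's per-character .get on an alphabetic char), then let
--     # str.translate do one table-driven pass; unmapped chars pass through.
--     table = {ord(k): v for k, v in decrypt_mapping.items()
--              if len(k) == 1 and k.isalpha()}
--     return ciphertext.translate(table)
-- ===== Notes on version B (the rewrite author's own statement) =====
-- stated objective: idiomatic
-- what changed: Instead of an explicit per-character loop with an isalpha branch and dict.get, B builds a translation table once (keeping only single-character alphabetic keys) and performs the whole pass with str.translate.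
import Mathlib
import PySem

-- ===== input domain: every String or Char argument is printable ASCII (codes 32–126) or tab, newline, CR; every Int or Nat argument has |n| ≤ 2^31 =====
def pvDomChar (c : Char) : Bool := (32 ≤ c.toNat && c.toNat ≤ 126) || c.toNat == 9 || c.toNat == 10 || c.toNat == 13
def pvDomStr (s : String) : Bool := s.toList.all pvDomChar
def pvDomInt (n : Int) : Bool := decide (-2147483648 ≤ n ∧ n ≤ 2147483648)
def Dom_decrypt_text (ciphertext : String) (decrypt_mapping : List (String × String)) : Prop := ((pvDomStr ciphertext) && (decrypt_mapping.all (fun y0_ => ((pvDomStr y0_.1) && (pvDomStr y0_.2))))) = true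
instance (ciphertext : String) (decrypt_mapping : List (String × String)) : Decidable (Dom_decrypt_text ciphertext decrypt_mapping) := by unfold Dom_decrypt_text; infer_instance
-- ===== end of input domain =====

-- B replaces A's per-character loop/branch by a translation table built once and one
-- table-driven pass (idiomatic, same behaviour).

-- ===== PORT A =====
-- A: loop over characters, branch on isalpha, look the 1-char string up in the
-- mapping (first match = Python dict), append the piece, join at the end.
def decrypt_text (ciphertext : String) (decrypt_mapping : List (String × String)) : String :=
  PySem.Str.join ""
    (ciphertext.toList.foldl
      (fun acc ch =>
        if PySem.Chars.isalpha ch then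
          -- decrypt_mapping.get(char, char); char is the 1-character string of ch
          acc ++ [(PySem.Dict.mk decrypt_mapping).getD (String.ofList [ch]) (String.ofList [ch])]
        else
          acc ++ [String.ofList [ch]])
      [])

-- ===== PORT B =====
-- the dict-comprehension filter of Source B: keep only single-character alphabetic keys
def pvStep (t : PySem.Dict Char String) (kv : String × String) : PySem.Dict Char String :=
  match kv.1.toList with
  | [c] => if PySem.Chars.isalpha c then t.insert c kv.2 else t
  | _ => t

-- B: build the table once, then str.translate = one lookup-or-keep pass, joined.
def decrypt_text_alt (ciphertext : String) (decrypt_mapping : List (String × String)) : String :=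
  PySem.Str.join ""
    (ciphertext.toList.map
      (fun c => ((decrypt_mapping.foldl pvStep PySem.Dict.empty).get? c).getD (String.ofList [c])))

-- ===== PRECONDITION & SPEC =====
-- Pre_ excludes association lists with duplicate keys: such an input is not
-- representable as a Python dict (a dict literal collapses duplicates, and A called
-- with a plain list of pairs raises AttributeError), and on it the two ports'
-- first-match vs overwrite-on-rebuild conventions accidentally differ.
def Pre_decrypt_text (ciphertext : String) (decrypt_mapping : List (String × String)) : Prop :=
  (decrypt_mapping.map Prod.fst).Nodup
instance (ciphertext : String) (decrypt_mapping : List (String × String)) : Decidable (Pre_decrypt_text ciphertext decrypt_mapping) := by unfold Pre_decrypt_text; infer_instance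

def pvWitness_decrypt_text : String × (List (String × String)) := ("Ab c!", [("A", "x"), ("b", "y")])

def Spec_decrypt_text (ciphertext : String) (decrypt_mapping : List (String × String)) (out : String) : Prop := out = decrypt_text_alt ciphertext decrypt_mapping
instance (ciphertext : String) (decrypt_mapping : List (String × String)) (out : String) : Decidable (Spec_decrypt_text ciphertext decrypt_mapping out) := by unfold Spec_decrypt_text; infer_instance

-- ===== CLAIM (what is proved, stated in full; the proofs are below) =====
def Claim_equal_decrypt_text : Prop := ∀ (ciphertext : String) (decrypt_mapping : List (String × String)), Dom_decrypt_text ciphertext decrypt_mapping → Pre_decrypt_text ciphertext decrypt_mapping → Spec_decrypt_text ciphertext decrypt_mapping (decrypt_text ciphertext decrypt_mapping)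

-- ===== LEMMAS AND PROOFS =====

-- a key absent from the association list is not found
lemma pv_get?_mk_none (m : List (String × String)) (k : String)
    (h : k ∉ m.map Prod.fst) : (PySem.Dict.mk m).get? k = none := by
  simp only [PySem.Dict.get?, Option.map_eq_none_iff, List.find?_eq_none]
  intro p hp
  simp only [beq_iff_eq]
  intro he
  exact h (List.mem_map.mpr ⟨p, hp, he⟩)

-- on an alphabetic char, the built table looks up exactly what A's dict.get finds
lemma pv_tbl_get_alpha (m : List (String × String)) (c : Char)
    (hc : PySem.Chars.isalpha c = true) (hnd : (m.map Prod.fst).Nodup) :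
    ∀ t : PySem.Dict Char String,
      (m.foldl pvStep t).get? c =
        ((PySem.Dict.mk m).get? (String.ofList [c])).or (t.get? c) := by
  induction m with
  | nil =>
    intro t
    simp [PySem.Dict.get?]
  | cons p rest ih =>
    intro t
    obtain ⟨k, v⟩ := p
    simp only [List.map_cons, List.nodup_cons] at hnd
    obtain ⟨hk, hrest⟩ := hnd
    rw [List.foldl_cons]
    have hmkc : (PySem.Dict.mk ((k, v) :: rest)).get? (String.ofList [c]) =
        if (k == String.ofList [c]) = true then some v
        else (PySem.Dict.mk rest).get? (String.ofList [c]) :=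
      PySem.Dict.get?_mk_cons k v rest (String.ofList [c])
    rcases hL : k.toList with _ | ⟨c₁, tail⟩
    · -- empty-string key: filtered out, and cannot equal the 1-char key
      have hne : (k == String.ofList [c]) = false := by
        rw [beq_eq_false_iff_ne]
        intro he
        rw [he, String.toList_ofList] at hL
        exact List.cons_ne_nil _ _ hL
      rw [hmkc, hne]
      simp only [pvStep, hL]
      rw [ih hrest t]
      rfl
    · rcases tail with _ | ⟨c₂, tail2⟩
      · -- single-character key
        have hk1 : k = String.ofList [c₁] := by rw [← hL, String.ofList_toList]
        by_cases hca : PySem.Chars.isalpha c₁ = true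
        · by_cases hceq : c₁ = c
          · subst hceq
            have hstep : pvStep t (k, v) = t.insert c₁ v := by
              simp [pvStep, hL, hca]
            rw [hstep, ih hrest]
            have hnone : (PySem.Dict.mk rest).get? (String.ofList [c₁]) = none := by
              apply pv_get?_mk_none
              rw [← hk1]; exact hk
            have heq : (k == String.ofList [c₁]) = true := by rw [hk1]; simp
            rw [hmkc, heq, hnone, PySem.Dict.get?_insert_self]
            rfl
          · have hstep : pvStep t (k, v) = t.insert c₁ v := by
              simp [pvStep, hL, hca]
            have hne : (k == String.ofList [c]) = false := by
              rw [beq_eq_false_iff_ne]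
              intro he
              rw [hk1] at he
              exact hceq (by simpa using congrArg String.toList he)
            rw [hstep, ih hrest, hmkc, hne,
              PySem.Dict.get?_insert_of_ne _ _ (Ne.symm hceq)]
            rfl
        · -- non-alphabetic single-char key: filtered out; c is alphabetic so k ≠ "c"
          have hstep : pvStep t (k, v) = t := by
            simp [pvStep, hL, hca]
          have hne : (k == String.ofList [c]) = false := by
            rw [beq_eq_false_iff_ne]
            intro he
            rw [hk1] at he
            have hcc : c₁ = c := by simpa using congrArg String.toList he
            rw [hcc, hc] at hca
            exact hca rfl
          rw [hstep, ih hrest, hmkc, hne]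
          rfl
      · -- multi-character key: filtered out, never equals a 1-char key
        have hne : (k == String.ofList [c]) = false := by
          rw [beq_eq_false_iff_ne]
          intro he
          rw [he, String.toList_ofList] at hL
          simp at hL
        rw [hmkc, hne]
        simp only [pvStep, hL]
        rw [ih hrest t]
        rfl

-- a non-alphabetic char is never a key of the table
lemma pv_tbl_get_nonalpha (m : List (String × String)) (c : Char)
    (hc : PySem.Chars.isalpha c = false) :
    ∀ t : PySem.Dict Char String, t.get? c = none →
      (m.foldl pvStep t).get? c = none := by
  induction m with
  | nil => intro t ht; simpa using ht
  | cons p rest ih =>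
    intro t ht
    obtain ⟨k, v⟩ := p
    rw [List.foldl_cons]
    rcases hL : k.toList with _ | ⟨c₁, tail⟩
    · simp only [pvStep, hL]; exact ih t ht
    · rcases tail with _ | ⟨c₂, tail2⟩
      · by_cases hca : PySem.Chars.isalpha c₁ = true
        · have hstep : pvStep t (k, v) = t.insert c₁ v := by
            simp [pvStep, hL, hca]
          rw [hstep]
          apply ih
          rw [PySem.Dict.get?_insert_of_ne _ _ (fun he => by rw [he, hca] at hc; exact Bool.noConfusion hc)]
          exact ht
        · have hstep : pvStep t (k, v) = t := by simp [pvStep, hL, hca]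
          rw [hstep]; exact ih t ht
      · simp only [pvStep, hL]; exact ih t ht

-- per-character agreement of A's branch with B's table lookup
lemma pv_pointwise (m : List (String × String)) (hnd : (m.map Prod.fst).Nodup)
    (ch : Char) :
    (if PySem.Chars.isalpha ch then
        (PySem.Dict.mk m).getD (String.ofList [ch]) (String.ofList [ch])
      else String.ofList [ch]) =
      ((m.foldl pvStep PySem.Dict.empty).get? ch).getD (String.ofList [ch]) := by
  by_cases hc : PySem.Chars.isalpha ch = true
  · rw [if_pos hc, pv_tbl_get_alpha m ch hc hnd PySem.Dict.empty,
      PySem.Dict.get?_empty, Option.or_none, PySem.Dict.getD_eq_get?_getD]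
  · rw [if_neg hc,
      pv_tbl_get_nonalpha m ch (by simpa using hc) PySem.Dict.empty (PySem.Dict.get?_empty ch)]
    rfl

-- ===== VERDICT (by name: the statement is the Claim_ definition above) =====
theorem decrypt_text_spec : Claim_equal_decrypt_text := by
  unfold Claim_equal_decrypt_text
  intro ciphertext m _ hpre
  unfold Spec_decrypt_text decrypt_text decrypt_text_alt
  have hfun :
      (fun (acc : List String) ch =>
          if PySem.Chars.isalpha ch then
            acc ++ [(PySem.Dict.mk m).getD (String.ofList [ch]) (String.ofList [ch])]
          else acc ++ [String.ofList [ch]]) =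
        (fun acc ch =>
          acc ++ [if PySem.Chars.isalpha ch then
              (PySem.Dict.mk m).getD (String.ofList [ch]) (String.ofList [ch])
            else String.ofList [ch]]) := by
    funext acc ch; split <;> rfl
  rw [hfun, PySem.List.foldl_append_singleton_eq_map]
  simp only [List.nil_append]
  congr 1
  apply List.map_congr_left
  intro ch _
  exact pv_pointwise m hpre ch
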